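-- pv_equiv track=rewrite | github.com/GDelvoye/pegase_metacom | package_thierache/analyse_resultat.py | diversite_gamma
-- ===== SOURCE A (Python) =====
-- def diversite_gamma(liste_compo):
--     R=0
--     for s in range(0,len(liste_compo[0])):
--         R_s = 0
--         for i in range(0,len(liste_compo)):
--             R_s+=liste_compo[i][s]
--         if R_s >0:
--             R+=1
--     return R
-- ===== SOURCE B (Python) =====
-- def diversite_gamma(liste_compo):
--     n = len(liste_compo[0])
--
--     def colsums(lo, hi):
--         if hi - lo == 1:
--             return liste_compo[lo][:n]
--         mid = (lo + hi) // 2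
--         return [a + b for a, b in zip(colsums(lo, mid), colsums(mid, hi))]
--
--     return len([t for t in colsums(0, len(liste_compo)) if t > 0])
-- ===== Notes on version B (the rewrite author's own statement) =====
-- stated objective: alternative
-- what changed: B computes the vector of column sums by divide-and-conquer recursion on the row range (split in half, zip-add the two half results, base case = a slice of one row), then counts the positive entries with a filter; A uses an indexed columns-outer/rows-inner double loop with a scalar accumulator per column.
import Mathlib
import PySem

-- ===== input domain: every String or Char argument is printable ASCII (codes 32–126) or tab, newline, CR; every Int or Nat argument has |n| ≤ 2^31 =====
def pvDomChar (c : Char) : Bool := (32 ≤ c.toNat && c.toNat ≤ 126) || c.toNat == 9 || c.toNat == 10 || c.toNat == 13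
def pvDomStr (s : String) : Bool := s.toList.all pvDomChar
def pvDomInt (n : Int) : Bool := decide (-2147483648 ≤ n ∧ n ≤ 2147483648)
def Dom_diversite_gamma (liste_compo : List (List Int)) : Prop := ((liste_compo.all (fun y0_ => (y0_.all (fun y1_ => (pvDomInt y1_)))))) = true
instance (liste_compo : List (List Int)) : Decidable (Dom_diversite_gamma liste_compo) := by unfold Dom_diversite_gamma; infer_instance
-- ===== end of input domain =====

-- B computes the column-sum vector by divide-and-conquer on the row range (halve, zip-add, base =
-- one row's slice) and then filter-counts the positives (alternative decomposition, same cost).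


-- ===== PORT A =====
def diversite_gamma (liste_compo : List (List Int)) : Int :=
  (PySem.List.pyRange 0 ((liste_compo.headD []).length : Int) 1).foldl
    (fun R s =>
      let R_s : Int :=
        (PySem.List.pyRange 0 (liste_compo.length : Int) 1).foldl
          (fun acc i => acc + PySem.List.pyGetD (PySem.List.pyGetD liste_compo i []) s 0) 0
      if R_s > 0 then R + 1 else R)
    0

-- ===== PORT B =====
-- colsums(lo, hi): Python only ever calls it with lo < hi; the '≤ 1' (instead of '== 1') in the
-- guard is only a totality guard for the unreachable hi ≤ lo case (Python would not terminate).
def pvColsums (liste_compo : List (List Int)) (n : Int) (lo hi : Int) : List Int :=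
  if _h : hi - lo ≤ 1 then
    PySem.List.slice (PySem.List.pyGetD liste_compo lo []) none (some n)
  else
    let mid := PySem.Int.floordiv (lo + hi) 2
    ((pvColsums liste_compo n lo mid).zip (pvColsums liste_compo n mid hi)).map
      (fun p => p.1 + p.2)
termination_by (hi - lo).toNat
decreasing_by
  all_goals rw [PySem.Int.floordiv_eq_ediv_of_pos (by norm_num : (0:Int) < 2)]
  all_goals omega

def diversite_gamma_alt (liste_compo : List (List Int)) : Int :=
  let n : Int := ((liste_compo.headD []).length : Int)
  (((pvColsums liste_compo n 0 (liste_compo.length : Int)).filter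
      (fun t => t > 0)).length : Int)

-- ===== PRECONDITION & SPEC =====
-- Pre_ excludes exactly the inputs where the Python A raises IndexError: the empty matrix
-- (liste_compo[0]) and matrices with a row shorter than the first row (liste_compo[i][s]).
def Pre_diversite_gamma (liste_compo : List (List Int)) : Prop :=
  liste_compo ≠ [] ∧ ∀ row ∈ liste_compo, (liste_compo.headD []).length ≤ row.length
instance (liste_compo : List (List Int)) : Decidable (Pre_diversite_gamma liste_compo) := by
  unfold Pre_diversite_gamma; infer_instance

def pvWitness_diversite_gamma : List (List Int) := [[1, -2, 0], [2, 1, -1]]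

def Spec_diversite_gamma (liste_compo : List (List Int)) (out : Int) : Prop := out = diversite_gamma_alt liste_compo
instance (liste_compo : List (List Int)) (out : Int) : Decidable (Spec_diversite_gamma liste_compo out) := by unfold Spec_diversite_gamma; infer_instance

-- ===== CLAIM (what is proved, stated in full; the proofs are below) =====
def Claim_equal_diversite_gamma : Prop := ∀ (liste_compo : List (List Int)), Dom_diversite_gamma liste_compo → Pre_diversite_gamma liste_compo → Spec_diversite_gamma liste_compo (diversite_gamma liste_compo)

-- ===== LEMMAS AND PROOFS =====

-- the sum of column s over the rows with indices in [lo, hi)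
def pvSeg (l : List (List Int)) (lo hi k : Nat) : Int :=
  (((l.drop lo).take (hi - lo)).map (fun row => row.getD k 0)).sum

-- the total column sum both sides count
def pvCol (l : List (List Int)) (s : Int) : Int :=
  (l.map (fun row => PySem.List.pyGetD row s 0)).sum

lemma pvTake_eq_map_range (row : List Int) (n : Nat) (h : n ≤ row.length) :
    row.take n = (List.range n).map (fun k => row.getD k 0) := by
  apply List.ext_getElem
  · simp [h]
  · intro i h1 h2
    simp only [List.getElem_take, List.getElem_map, List.getElem_range]
    rw [List.getD_eq_getElem _ _ (by simp at h1; omega)]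

lemma pvSeg_split (l : List (List Int)) (lo mid hi k : Nat)
    (h1 : lo ≤ mid) (h2 : mid ≤ hi) :
    pvSeg l lo hi k = pvSeg l lo mid k + pvSeg l mid hi k := by
  unfold pvSeg
  have hsplit : (l.drop lo).take (hi - lo)
      = (l.drop lo).take (mid - lo) ++ ((l.drop lo).drop (mid - lo)).take (hi - mid) := by
    rw [← List.take_add]
    congr 1
    omega
  rw [hsplit, List.map_append, List.sum_append, List.drop_drop]
  have h3 : lo + (mid - lo) = mid := by omega
  rw [h3]

lemma pvColsums_char (l : List (List Int)) (n : Nat)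
    (hrows : ∀ row ∈ l, n ≤ row.length) :
    ∀ (d lo hi : Nat), hi - lo = d → lo < hi → hi ≤ l.length →
    pvColsums l (n : Int) (lo : Int) (hi : Int)
      = (List.range n).map (fun k => pvSeg l lo hi k) := by
  intro d
  induction d using Nat.strong_induction_on with
  | _ d ih =>
    intro lo hi hd hlt hle
    by_cases hbase : hi = lo + 1
    · subst hbase
      rw [pvColsums]
      rw [dif_pos (by omega)]
      have hlo : lo < l.length := by omega
      rw [PySem.List.pyGetD_natCast, PySem.List.slice_to_natCast,
        List.getD_eq_getElem _ _ hlo,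
        pvTake_eq_map_range _ _ (hrows _ (List.getElem_mem hlo))]
      refine List.map_congr_left (fun k _ => ?_)
      unfold pvSeg
      have h1 : lo + 1 - lo = 1 := by omega
      rw [h1, List.drop_eq_getElem_cons hlo, List.take_succ_cons, List.take_zero]
      simp
    · have h2 : lo + 2 ≤ hi := by omega
      rw [pvColsums]
      rw [dif_neg (by omega)]
      have hmid : PySem.Int.floordiv ((lo : Int) + (hi : Int)) 2 = (((lo + hi) / 2 : Nat) : Int) := by
        exact_mod_cast PySem.Int.floordiv_natCast (lo + hi) 2
      set m : Nat := (lo + hi) / 2 with hm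
      have hb1 : lo < m := by omega
      have hb2 : m < hi := by omega
      simp only [hmid]
      rw [ih (m - lo) (by omega) lo m rfl hb1 (by omega),
        ih (hi - m) (by omega) m hi rfl hb2 hle,
        List.zip_map', List.map_map]
      refine List.map_congr_left (fun k _ => ?_)
      simp [Function.comp, pvSeg_split l lo m hi k (by omega) (by omega)]

lemma pvB_char (l : List (List Int)) (hpre : Pre_diversite_gamma l) :
    diversite_gamma_alt l
      = ((List.range (l.headD []).length).countP
          (fun k : Nat => 0 < pvCol l (k : Int)) : Int) := by
  obtain ⟨hne, hrows⟩ := hpre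
  have hlen : 0 < l.length := List.length_pos_iff.mpr hne
  rw [show diversite_gamma_alt l
      = (((pvColsums l ((l.headD []).length : Int) ((0 : Nat) : Int) (l.length : Int)).filter
            (fun t => t > 0)).length : Int) from rfl]
  rw [pvColsums_char l (l.headD []).length hrows (l.length - 0) 0 l.length rfl hlen le_rfl]
  have hseg : ∀ k : Nat, decide (0 < pvSeg l 0 l.length k) = decide (0 < pvCol l (k : Int)) := by
    intro k
    unfold pvSeg pvCol
    simp
  rw [List.filter_map, List.length_map, ← List.countP_eq_length_filter]
  simp only [Function.comp_def, gt_iff_lt]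
  rw [List.countP_congr (fun k _ => by rw [hseg k])]

lemma pvA_char (l : List (List Int)) :
    diversite_gamma l
      = ((List.range (l.headD []).length).countP
          (fun k : Nat => 0 < pvCol l (k : Int)) : Int) := by
  unfold diversite_gamma
  have hin : ∀ s : Int,
      (PySem.List.pyRange 0 (l.length : Int) 1).foldl
        (fun acc i => acc + PySem.List.pyGetD (PySem.List.pyGetD l i []) s 0) 0
      = pvCol l s := by
    intro s
    rw [PySem.List.foldl_pyRange_zero_pyGetD' l [] (fun acc row => acc + PySem.List.pyGetD row s 0) 0,
      PySem.List.foldl_add]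
    simp [pvCol]
  simp only [hin]
  rw [PySem.List.pyRange_zero_natCast, List.foldl_map,
    PySem.List.foldl_ite_add_one (fun k : Nat => pvCol l (k : Int) > 0)]
  simp

-- ===== VERDICT (by name: the statement is the Claim_ definition above) =====
theorem diversite_gamma_spec : Claim_equal_diversite_gamma := by
  intro l _ hpre
  unfold Spec_diversite_gamma
  rw [pvA_char, pvB_char l hpre]
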